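-- pv_equiv track=rewrite | github.com/yunzae/ProblemSolving | 구현/골프존2.py | solution
-- ===== SOURCE A (Python) =====
-- from collections import defaultdict
--
-- def solution(products, purchased):
--     not_purchased=[]
--     features = defaultdict(int)
--     for product in products:
--         temp = product.split(" ")
--         if temp[0] in purchased:
--             for i in range(1,len(temp)):
--                 features[temp[i]]+=1
--         else:
--             not_purchased.append(temp)
--     features = sorted(features.items(), key=lambda x: (-x[1],x[0]))
--
--     for f,c in features:
--         if len(not_purchased)==1:
--             break
--         temp=[]
--         for n in not_purchased:
--             if f in n:
--                 temp.append(n)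
--         if len(temp)==0:
--             continue
--         else:
--             not_purchased = temp
--
--     return not_purchased[0][0]
-- ===== SOURCE B (Python) =====
-- def solution(products, purchased):
--     purchased_set = set(purchased)
--     counts = {}
--     names = []       # first tokens of non-purchased products, in order
--     index = {}       # feature/token -> set of indices into names
--     for product in products:
--         tokens = product.split(" ")
--         if tokens[0] in purchased_set:
--             for t in tokens[1:]:
--                 counts[t] = counts.get(t, 0) + 1
--         else:
--             i = len(names)
--             names.append(tokens[0])
--             for t in set(tokens):
--                 index.setdefault(t, set()).add(i)
--     candidates = set(range(len(names)))
--     for f, _ in sorted(counts.items(), key=lambda x: (-x[1], x[0])):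
--         if len(candidates) == 1:
--             break
--         hits = candidates & index.get(f, set())
--         if hits:
--             candidates = hits
--     return names[min(candidates)]
-- ===== Notes on version B (the rewrite author's own statement) =====
-- stated objective: faster
-- what changed: A rescans every remaining non-purchased token list for each sorted feature (list membership per candidate); B builds an inverted index feature->set of candidate indices in one pass, intersects index sets per feature, and returns the name at the minimal surviving index.
import Mathlib
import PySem

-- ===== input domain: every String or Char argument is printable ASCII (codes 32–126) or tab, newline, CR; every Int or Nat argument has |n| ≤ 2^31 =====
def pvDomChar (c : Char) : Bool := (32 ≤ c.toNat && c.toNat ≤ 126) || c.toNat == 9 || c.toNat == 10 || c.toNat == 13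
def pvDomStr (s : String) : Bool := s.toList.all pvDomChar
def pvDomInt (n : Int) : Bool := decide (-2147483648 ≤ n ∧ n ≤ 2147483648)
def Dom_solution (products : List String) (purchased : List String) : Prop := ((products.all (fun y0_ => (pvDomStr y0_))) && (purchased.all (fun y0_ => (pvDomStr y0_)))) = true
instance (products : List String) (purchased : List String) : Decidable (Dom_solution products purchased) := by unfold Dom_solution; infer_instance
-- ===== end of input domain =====

-- B replaces A's repeated scans of the remaining candidate token-lists by an inverted index
-- (feature -> set of candidate indices) built in one pass, intersecting index sets and
-- returning the name at the minimal surviving index.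

-- ===== PORT A =====
-- body of A's first loop (split, count features of purchased, collect non-purchased)
def solutionStepA (purchased : List String)
    (st : List (List String) × PySem.Dict String Int) (product : String) :
    List (List String) × PySem.Dict String Int :=
  let temp := (PySem.Str.split? product " ").getD []
  if purchased.contains (PySem.List.pyGetD temp 0 "") then
    (st.1, (PySem.List.pyRange 1 (PySem.List.len temp) 1).foldl
             (fun d i => d.modify (PySem.List.pyGetD temp i "") 0 (· + 1)) st.2)
  else
    (st.1 ++ [temp], st.2)

-- A's second loop with its break: repeatedly filter not_purchased by the next feature
def solutionLoopA : List (String × Int) → List (List String) → List (List String)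
  | [], np => np
  | (f, _) :: rest, np =>
    if PySem.List.len np == 1 then np
    else
      let temp := np.foldl (fun acc n => if n.contains f then acc ++ [n] else acc) []
      if PySem.List.len temp == 0 then solutionLoopA rest np
      else solutionLoopA rest temp

def solution (products : List String) (purchased : List String) : String :=
  let st := products.foldl (solutionStepA purchased) ([], PySem.Dict.empty)
  let feats := PySem.List.sorted2 st.2.items (fun x => -x.2) (fun x => x.1)
  let np := solutionLoopA feats st.1
  PySem.List.pyGetD (PySem.List.pyGetD np 0 []) 0 ""

-- ===== PORT B =====
-- body of B's single pass (counts for purchased; names and inverted index for the rest)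
def solutionStepB (pset : PySem.Set String)
    (st : PySem.Dict String Int × List String × PySem.Dict String (PySem.Set Int))
    (product : String) :
    PySem.Dict String Int × List String × PySem.Dict String (PySem.Set Int) :=
  let tokens := (PySem.Str.split? product " ").getD []
  if PySem.Set.contains pset (PySem.List.pyGetD tokens 0 "") then
    ((PySem.List.slice tokens (some 1) none).foldl
       (fun d t => d.insert t (d.getD t 0 + 1)) st.1, st.2)
  else
    let i := PySem.List.len st.2.1
    (st.1, st.2.1 ++ [PySem.List.pyGetD tokens 0 ""],
     (PySem.Set.ofList tokens).foldl
       (fun ix t => ix.modify t PySem.Set.empty (fun s => PySem.Set.add s i)) st.2.2)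

-- B's second loop with its break: intersect the candidate-index set with each feature's index set
def solutionLoopB (ix : PySem.Dict String (PySem.Set Int)) :
    List (String × Int) → PySem.Set Int → PySem.Set Int
  | [], cand => cand
  | (f, _) :: rest, cand =>
    if PySem.Set.len cand == 1 then cand
    else
      let hits := PySem.Set.inter cand (ix.getD f PySem.Set.empty)
      if hits.isEmpty then solutionLoopB ix rest cand
      else solutionLoopB ix rest hits

def solution_alt (products : List String) (purchased : List String) : String :=
  let pset := PySem.Set.ofList purchased
  let st := products.foldl (solutionStepB pset) (PySem.Dict.empty, [], PySem.Dict.empty)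
  let cand0 := PySem.Set.ofList (PySem.List.pyRange 0 (PySem.List.len st.2.1) 1)
  let cand := solutionLoopB st.2.2
    (PySem.List.sorted2 st.1.items (fun x => -x.2) (fun x => x.1)) cand0
  match PySem.List.min? cand (fun x => x) with
  | some m => PySem.List.pyGetD st.2.1 m ""
  | none => ""

-- ===== PRECONDITION & SPEC =====
-- A raises IndexError (and B ValueError) when every product's first token is purchased,
-- i.e. when not_purchased stays empty; Pre_ keeps exactly the inputs where A returns.
def Pre_solution (products : List String) (purchased : List String) : Prop :=
  ∃ p ∈ products,
    purchased.contains (PySem.List.pyGetD ((PySem.Str.split? p " ").getD []) 0 "") = false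
instance (products : List String) (purchased : List String) : Decidable (Pre_solution products purchased) := by unfold Pre_solution; infer_instance

def pvWitness_solution : List String × List String := (["pen black small", "ink blue small"], ["ink"])

def Spec_solution (products : List String) (purchased : List String) (out : String) : Prop := out = solution_alt products purchased
instance (products : List String) (purchased : List String) (out : String) : Decidable (Spec_solution products purchased out) := by unfold Spec_solution; infer_instance

-- ===== CLAIM (what is proved, stated in full; the proofs are below) =====
def Claim_equal_solution : Prop := ∀ (products : List String) (purchased : List String), Dom_solution products purchased → Pre_solution products purchased → Spec_solution products purchased (solution products purchased)

-- ===== LEMMAS AND PROOFS =====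

-- abbreviations for the proofs
def pvTok (p : String) : List String := (PySem.Str.split? p " ").getD []
def pvHd (t : List String) : String := PySem.List.pyGetD t 0 ""
-- the inverted index B maintains, expressed over A's not_purchased list
def pvIdx (f : String) (np : List (List String)) : List Int :=
  (List.range np.length).filterMap (fun i => if (np.getD i []).contains f then some (i : Int) else none)
-- the sub-list of np selected by a candidate-index set
def pvSel (np0 : List (List String)) (cand : List Int) : List (List String) :=
  (List.range np0.length).filterMap (fun (i : Nat) => if cand.contains (i : Int) then some (np0.getD i []) else none)

theorem pvMap_getD_range {a : Type} (l : List a) (d : a) :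
    (List.range l.length).map (fun i => l.getD i d) = l := by
  apply List.ext_getElem
  · simp
  · intro i h1 h2
    simp [List.getD_eq_getElem?_getD, List.getElem?_eq_getElem h2]

theorem pvFilterMap_if {a b : Type} (c : a → Bool) (g : a → b) (l : List a) :
    l.filterMap (fun i => if c i then some (g i) else none) = (l.filter c).map g := by
  induction l with
  | nil => rfl
  | cons x t ih => by_cases h : c x <;> simp [List.filter_cons, h, ih]

theorem pvMem_pvIdx (f : String) (np : List (List String)) (x : Int) :
    x ∈ pvIdx f np ↔ 0 ≤ x ∧ x < (np.length : Int) ∧ (np.getD x.toNat []).contains f := by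
  simp only [pvIdx, List.mem_filterMap, List.mem_range]
  constructor
  · rintro ⟨i, hi, hc⟩
    split at hc
    · rename_i hcond
      cases hc
      refine ⟨by omega, by exact_mod_cast hi, ?_⟩
      simpa using hcond
    · cases hc
  · rintro ⟨h0, hlt, hc⟩
    refine ⟨x.toNat, by omega, ?_⟩
    rw [if_pos hc, Int.toNat_of_nonneg h0]

theorem pvIdx_append (f : String) (np : List (List String)) (t : List String) :
    pvIdx f (np ++ [t]) =
      if t.contains f then pvIdx f np ++ [(np.length : Int)] else pvIdx f np := by
  simp only [pvIdx, List.length_append, List.length_cons, List.length_nil, Nat.add_zero]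
  rw [List.range_succ, List.filterMap_append]
  have h1 : ∀ i ∈ List.range np.length,
      (if ((np ++ [t]).getD i []).contains f then some (i : Int) else none)
        = (if (np.getD i []).contains f then some (i : Int) else none) := by
    intro i hi
    rw [List.getD_append _ _ _ _ (List.mem_range.mp hi)]
  rw [List.filterMap_congr h1]
  have h2 : (np ++ [t]).getD np.length [] = t := by
    simp [List.getD_eq_getElem?_getD, List.getElem?_append_right (Nat.le_refl _)]
  by_cases hc : t.contains f
  · rw [if_pos hc]
    simp only [List.filterMap_cons, List.filterMap_nil, h2, hc, if_true]
  · rw [if_neg (by simpa using hc)]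
    simp only [List.filterMap_cons, List.filterMap_nil, h2]
    rw [if_neg hc, List.append_nil]

theorem pvCond (purchased : List String) (x : String) :
    PySem.Set.contains (PySem.Set.ofList purchased) x = purchased.contains x := by
  by_cases h : x ∈ purchased <;>
    simp [PySem.Set.contains_iff, PySem.Set.mem_ofList, List.contains_iff_mem, h]

theorem pvGetD_foldl_modify {v : Type} (g : v → v) (e : v) :
    ∀ (l : List String) (d : PySem.Dict String v), l.Nodup →
      ∀ f, (l.foldl (fun d t => d.modify t e g) d).getD f e
        = if f ∈ l then g (d.getD f e) else d.getD f e := by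
  intro l
  induction l with
  | nil => simp
  | cons t rest ih =>
    intro d hnd f
    simp only [List.foldl_cons]
    rw [ih _ hnd.of_cons f]
    have hmod : ∀ f', (d.modify t e g).getD f' e = if f' = t then g (d.getD t e) else d.getD f' e := by
      intro f'
      simp [PySem.Dict.modify, PySem.Dict.getD_insert]
    by_cases hf : f ∈ rest
    · have hne : f ≠ t := by rintro rfl; exact (List.nodup_cons.mp hnd).1 hf
      simp [hf, hmod, hne]
    · have htr : t ∉ rest := (List.nodup_cons.mp hnd).1
      by_cases hft : f = t <;> simp [hf, hmod, hft, htr]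

theorem pvSet_add_notMem {a : Type} [BEq a] [LawfulBEq a] (s : PySem.Set a) (x : a)
    (h : x ∉ s) : PySem.Set.add s x = s ++ [x] := by
  simp [PySem.Set.add, PySem.Set.contains]
  intro hc
  exact absurd (by simpa using hc) h

theorem pvTail_eq (t : List String) :
    t.tail = (List.range (t.length - 1)).map (fun k => t.getD (k + 1) "") := by
  cases t with
  | nil => rfl
  | cons a l =>
    simp only [List.tail_cons, List.length_cons, Nat.add_sub_cancel]
    have : (fun k => (a :: l).getD (k + 1) "") = (fun k => l.getD k "") := by
      funext k; simp
    rw [this, pvMap_getD_range]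

theorem pvCount_eq (temp : List String) (d : PySem.Dict String Int) :
    (PySem.List.pyRange 1 (PySem.List.len temp) 1).foldl
        (fun d i => d.modify (PySem.List.pyGetD temp i "") 0 (· + 1)) d
      = (PySem.List.slice temp (some 1) none).foldl
        (fun d t => d.insert t (d.getD t 0 + 1)) d := by
  rw [PySem.List.slice_from_one, PySem.List.pyRange_one, List.foldl_map, pvTail_eq,
    List.foldl_map, PySem.List.len_eq]
  have hn : ((temp.length : Int) - 1).toNat = temp.length - 1 := by omega
  rw [hn]
  apply PySem.List.foldl_congr_mem
  intro acc k hk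
  have : (1 + (k : Int)) = ((k + 1 : Nat) : Int) := by push_cast; ring
  rw [this, PySem.List.pyGetD_natCast]
  rfl

theorem pvPhase1 (purchased : List String) :
    ∀ (ps : List String) (np : List (List String)) (d : PySem.Dict String Int)
      (ix : PySem.Dict String (PySem.Set Int)),
      (∀ f, ix.getD f PySem.Set.empty = pvIdx f np) →
      (ps.foldl (solutionStepB (PySem.Set.ofList purchased)) (d, np.map pvHd, ix)).1
          = (ps.foldl (solutionStepA purchased) (np, d)).2
        ∧ (ps.foldl (solutionStepB (PySem.Set.ofList purchased)) (d, np.map pvHd, ix)).2.1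
          = ((ps.foldl (solutionStepA purchased) (np, d)).1).map pvHd
        ∧ ∀ f, (ps.foldl (solutionStepB (PySem.Set.ofList purchased)) (d, np.map pvHd, ix)).2.2.getD f PySem.Set.empty
          = pvIdx f (ps.foldl (solutionStepA purchased) (np, d)).1 := by
  intro ps
  induction ps with
  | nil => intro np d ix hix; exact ⟨rfl, rfl, hix⟩
  | cons p rest ih =>
    intro np d ix hix
    simp only [List.foldl_cons, solutionStepA, solutionStepB, pvCond]
    by_cases hc : purchased.contains (PySem.List.pyGetD ((PySem.Str.split? p " ").getD []) 0 "")
    · rw [if_pos hc, if_pos hc, ← pvCount_eq]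
      exact ih np _ ix hix
    · rw [if_neg hc, if_neg hc]
      have hmap : List.map pvHd np ++ [PySem.List.pyGetD ((PySem.Str.split? p " ").getD []) 0 ""]
          = List.map pvHd (np ++ [(PySem.Str.split? p " ").getD []]) := by
        simp [pvHd]
      rw [hmap]
      apply ih
      intro f
      rw [pvGetD_foldl_modify _ _ _ _ (PySem.Set.nodup_ofList _) f, hix f, pvIdx_append]
      have hlen : PySem.List.len (List.map pvHd np) = (np.length : Int) := by
        rw [PySem.List.len_eq, List.length_map]
      by_cases hf : f ∈ (PySem.Str.split? p " ").getD []
      · rw [if_pos ((PySem.Set.mem_ofList _ _).mpr hf),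
          if_pos (List.contains_iff_mem.mpr hf), hlen,
          pvSet_add_notMem _ _ (by
            intro hmem
            have := (pvMem_pvIdx f np _).mp hmem
            omega)]
      · rw [if_neg (fun h => hf ((PySem.Set.mem_ofList _ _).mp h)),
          if_neg (by simpa using hf)]

theorem pvNpFold (purchased : List String) :
    ∀ (ps : List String) (np : List (List String)) (d : PySem.Dict String Int),
      (ps.foldl (solutionStepA purchased) (np, d)).1
        = np ++ (ps.filter (fun p => !purchased.contains (pvHd (pvTok p)))).map pvTok := by
  intro ps
  induction ps with
  | nil => intro np d; simp
  | cons p rest ih =>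
    intro np d
    simp only [List.foldl_cons, solutionStepA, List.filter_cons]
    by_cases hc : purchased.contains (PySem.List.pyGetD ((PySem.Str.split? p " ").getD []) 0 "")
    · rw [if_pos hc, ih]
      have : (!purchased.contains (pvHd (pvTok p))) = false := by
        simp only [pvHd, pvTok, hc, Bool.not_true]
      rw [this, if_neg (by simp)]
    · rw [if_neg hc, ih]
      have : (!purchased.contains (pvHd (pvTok p))) = true := by
        simp only [pvHd, pvTok, hc, Bool.not_false]
      rw [this]
      simp [pvTok, List.append_assoc]

theorem pvSel_eq_filter_map (np0 : List (List String)) (cand : List Int) :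
    pvSel np0 cand = ((List.range np0.length).filter (fun (i : Nat) => cand.contains (i : Int))).map
      (fun (i : Nat) => np0.getD i []) := by
  simp only [pvSel]
  exact pvFilterMap_if (fun (i : Nat) => cand.contains (i : Int)) (fun (i : Nat) => np0.getD i []) _

theorem pvSel_length (np0 : List (List String)) (cand : List Int)
    (h1 : cand.Nodup) (h2 : ∀ x ∈ cand, 0 ≤ x ∧ x < (np0.length : Int)) :
    (pvSel np0 cand).length = cand.length := by
  rw [pvSel_eq_filter_map, List.length_map]
  have hperm : (((List.range np0.length).filter (fun (i : Nat) => cand.contains (i : Int))).map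
      (fun (i : Nat) => (i : Int))).Perm cand := by
    apply (List.perm_ext_iff_of_nodup
      (List.Nodup.map (fun a b h => Int.natCast_inj.mp h) (List.Nodup.filter _ (List.nodup_range))) h1).mpr
    intro x
    simp only [List.mem_map, List.mem_filter, List.mem_range]
    constructor
    · rintro ⟨i, ⟨_, hc⟩, rfl⟩
      exact List.contains_iff_mem.mp hc
    · intro hx
      obtain ⟨hx0, hxlt⟩ := h2 x hx
      exact ⟨x.toNat, ⟨by omega, by rw [Int.toNat_of_nonneg hx0]; exact List.contains_iff_mem.mpr hx⟩,
        Int.toNat_of_nonneg hx0⟩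
  rw [show ((List.range np0.length).filter (fun (i : Nat) => cand.contains (i : Int))).length
      = (((List.range np0.length).filter (fun (i : Nat) => cand.contains (i : Int))).map
        (fun (i : Nat) => (i : Int))).length from by rw [List.length_map], hperm.length_eq]

theorem pvSel_nil (np0 : List (List String)) : pvSel np0 [] = [] := by
  simp [pvSel]

theorem pvSel_filter (np0 : List (List String)) (cand : List Int) (f : String) :
    (pvSel np0 cand).filter (fun t => t.contains f)
      = pvSel np0 (PySem.Set.inter cand (pvIdx f np0)) := by
  simp only [pvSel, List.filter_filterMap]
  apply List.filterMap_congr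
  intro i hi
  have hi' : i < np0.length := List.mem_range.mp hi
  have hmem : List.contains (PySem.Set.inter cand (pvIdx f np0)) (i : Int) = true
      ↔ ((i : Int) ∈ cand ∧ (np0.getD i []).contains f = true) := by
    rw [List.contains_iff_mem, PySem.Set.mem_inter, pvMem_pvIdx]
    constructor
    · rintro ⟨ha, _, _, hb⟩
      exact ⟨ha, by simpa using hb⟩
    · rintro ⟨ha, hb⟩
      exact ⟨ha, by omega, by exact_mod_cast hi', by simpa using hb⟩
  by_cases hc : (i : Int) ∈ cand <;> by_cases hf : (np0.getD i []).contains f = true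
  · rw [if_pos (List.contains_iff_mem.mpr hc), if_pos (hmem.mpr ⟨hc, hf⟩)]
    rw [Option.filter_some, if_pos hf]
  · rw [if_pos (List.contains_iff_mem.mpr hc), if_neg (fun h => hf (hmem.mp h).2),
      Option.filter_some, if_neg hf]
  · rw [if_neg (fun h => hc (List.contains_iff_mem.mp h)),
      if_neg (fun h => hc (hmem.mp h).1)]
    rfl
  · rw [if_neg (fun h => hc (List.contains_iff_mem.mp h)),
      if_neg (fun h => hc (hmem.mp h).1)]
    rfl

theorem pvSel_head (np0 : List (List String)) (cand : List Int) (m : Int)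
    (hm : m ∈ cand) (hmin : ∀ y ∈ cand, m ≤ y) (h0 : 0 ≤ m) (hlt : m < (np0.length : Int)) :
    ∃ t, pvSel np0 cand = np0.getD m.toNat [] :: t := by
  have hk : m.toNat < np0.length := by omega
  have hsplit : List.range np0.length
      = List.range m.toNat ++ (List.range (np0.length - m.toNat)).map (fun x => m.toNat + x) := by
    rw [← List.range_add, Nat.add_sub_cancel' hk.le]
  have hpos : np0.length - m.toNat = (np0.length - m.toNat - 1) + 1 := by omega
  simp only [pvSel, hsplit, List.filterMap_append]
  have hfirst : (List.range m.toNat).filterMap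
      (fun (i : Nat) => if cand.contains (i : Int) then some (np0.getD i []) else none) = [] := by
    rw [List.filterMap_eq_nil_iff]
    intro i hi
    rw [if_neg]
    intro hc
    have := hmin _ (List.contains_iff_mem.mp hc)
    have := List.mem_range.mp hi
    omega
  rw [hfirst, List.nil_append, hpos, List.range_succ_eq_map, List.map_cons, Nat.add_zero,
    List.filterMap_cons]
  rw [if_pos (by rw [Int.toNat_of_nonneg h0]; exact List.contains_iff_mem.mpr hm :
    cand.contains ((m.toNat : Nat) : Int) = true)]
  exact ⟨_, rfl⟩

theorem pvSel_full (np0 : List (List String)) :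
    pvSel np0 (PySem.List.pyRange 0 (np0.length : Int) 1) = np0 := by
  simp only [pvSel]
  have h : ∀ i ∈ List.range np0.length,
      (if (PySem.List.pyRange 0 (np0.length : Int) 1).contains (i : Int)
        then some (np0.getD i []) else none) = (some ∘ fun i => np0.getD i []) i := by
    intro i hi
    rw [if_pos (List.contains_iff_mem.mpr (PySem.List.mem_pyRange_one.mpr
      ⟨by omega, by exact_mod_cast List.mem_range.mp hi⟩))]
    rfl
  rw [List.filterMap_congr h, List.filterMap_eq_map, pvMap_getD_range]

theorem pvPhase2 (np0 : List (List String)) (ix : PySem.Dict String (PySem.Set Int))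
    (hix : ∀ f, ix.getD f PySem.Set.empty = pvIdx f np0) :
    ∀ (feats : List (String × Int)) (cand : List Int),
      cand.Nodup → (∀ x ∈ cand, 0 ≤ x ∧ x < (np0.length : Int)) → cand ≠ [] →
      solutionLoopA feats (pvSel np0 cand) = pvSel np0 (solutionLoopB ix feats cand)
      ∧ (solutionLoopB ix feats cand).Nodup
      ∧ (∀ x ∈ solutionLoopB ix feats cand, 0 ≤ x ∧ x < (np0.length : Int))
      ∧ solutionLoopB ix feats cand ≠ [] := by
  intro feats
  induction feats with
  | nil => intro cand h1 h2 h3; exact ⟨rfl, h1, h2, h3⟩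
  | cons fc rest ih =>
    obtain ⟨f, c⟩ := fc
    intro cand h1 h2 h3
    simp only [solutionLoopA, solutionLoopB]
    have hlenA : PySem.List.len (pvSel np0 cand) = (cand.length : Int) := by
      rw [PySem.List.len_eq, pvSel_length np0 cand h1 h2]
    have hlenB : PySem.Set.len cand = (cand.length : Int) := rfl
    rw [hlenA, hlenB]
    by_cases hone : cand.length = 1
    · have hb : (((cand.length : Nat) : Int) == 1) = true := beq_iff_eq.mpr (by exact_mod_cast hone)
      rw [if_pos hb, if_pos hb]
      exact ⟨rfl, h1, h2, h3⟩
    · have hb : ¬((((cand.length : Nat) : Int) == 1) = true) := by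
        simp only [beq_iff_eq]
        intro h; exact hone (by exact_mod_cast h)
      rw [if_neg hb, if_neg hb]
      have htemp : (pvSel np0 cand).foldl
          (fun acc n => if n.contains f then acc ++ [n] else acc) []
          = pvSel np0 (PySem.Set.inter cand (ix.getD f PySem.Set.empty)) := by
        calc (pvSel np0 cand).foldl (fun acc n => if n.contains f then acc ++ [n] else acc) []
            = (pvSel np0 cand).filter (fun t => t.contains f) := by
              simpa using PySem.List.foldl_append_if
                (fun (n : List String) => n.contains f) (fun n => n) (pvSel np0 cand) []
          _ = pvSel np0 (PySem.Set.inter cand (ix.getD f PySem.Set.empty)) := by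
              rw [hix f]; exact pvSel_filter np0 cand f
      rw [htemp]
      have hndh : (PySem.Set.inter cand (ix.getD f PySem.Set.empty)).Nodup :=
        PySem.Set.nodup_inter _ _ h1
      have hbdh : ∀ x ∈ PySem.Set.inter cand (ix.getD f PySem.Set.empty),
          0 ≤ x ∧ x < (np0.length : Int) := by
        intro x hx
        exact h2 x ((PySem.Set.mem_inter _ _ _).mp hx).1
      by_cases hh : PySem.Set.inter cand (ix.getD f PySem.Set.empty) = []
      · rw [hh, pvSel_nil]
        rw [if_pos (by simp), if_pos (by simp [hh])]
        exact ih cand h1 h2 h3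
      · have hlen' : PySem.List.len (pvSel np0 (PySem.Set.inter cand (ix.getD f PySem.Set.empty)))
            = ((PySem.Set.inter cand (ix.getD f PySem.Set.empty)).length : Int) := by
          rw [PySem.List.len_eq, pvSel_length np0 _ hndh hbdh]
        have hpos : (PySem.Set.inter cand (ix.getD f PySem.Set.empty)).length ≠ 0 :=
          fun h => hh (List.eq_nil_of_length_eq_zero h)
        rw [if_neg (by rw [hlen']; simpa using hpos), if_neg (fun hc => hh (List.isEmpty_iff.mp hc))]
        exact ih _ hndh hbdh hh


theorem solution_witness_ok :
    Dom_solution pvWitness_solution.1 pvWitness_solution.2 ∧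
    Pre_solution pvWitness_solution.1 pvWitness_solution.2 := by decide

-- ===== VERDICT (by name: the statement is the Claim_ definition above) =====
theorem solution_spec : Claim_equal_solution := by
  unfold Claim_equal_solution
  intro products purchased _hdom hpre
  unfold Spec_solution solution solution_alt
  dsimp only
  obtain ⟨hcounts, hnames, hidx⟩ := by
    have h := pvPhase1 purchased products [] PySem.Dict.empty PySem.Dict.empty
      (by intro f; rfl)
    simpa using h
  rw [hcounts, hnames]
  -- shared data
  have hn0 : (products.foldl (solutionStepA purchased) ([], PySem.Dict.empty)).1 ≠ [] := by
    rw [pvNpFold]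
    obtain ⟨p, hp, hc⟩ := hpre
    have hpf : p ∈ products.filter (fun p => !purchased.contains (pvHd (pvTok p))) :=
      List.mem_filter.mpr ⟨hp, by simp only [pvHd, pvTok, hc, Bool.not_false]⟩
    simp only [List.nil_append]
    intro hnil
    rw [List.map_eq_nil_iff] at hnil
    rw [hnil] at hpf
    exact absurd hpf (List.not_mem_nil)
  set np0 := (products.foldl (solutionStepA purchased) ([], PySem.Dict.empty)).1 with hnp0
  have hlen0 : 0 < np0.length := List.length_pos_of_ne_nil hn0
  have hcand0 : PySem.Set.ofList (PySem.List.pyRange 0 (PySem.List.len (np0.map pvHd)) 1)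
      = PySem.List.pyRange 0 (np0.length : Int) 1 := by
    rw [PySem.List.len_eq, List.length_map,
      PySem.Set.ofList_eq_self_of_nodup _ (PySem.List.nodup_pyRange_one _ _)]
  rw [hcand0]
  obtain ⟨heq, hnd, hbd, hne⟩ := pvPhase2 np0 _ hidx
    (PySem.List.sorted2
      ((products.foldl (solutionStepA purchased) ([], PySem.Dict.empty)).2.items)
      (fun x => -x.2) (fun x => x.1))
    (PySem.List.pyRange 0 (np0.length : Int) 1)
    (PySem.List.nodup_pyRange_one _ _)
    (fun x hx => by
      have := PySem.List.mem_pyRange_one.mp hx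
      exact ⟨this.1, this.2⟩)
    (by
      intro hnil
      have : (0 : Int) ∈ PySem.List.pyRange 0 (np0.length : Int) 1 :=
        PySem.List.mem_pyRange_one.mpr ⟨le_refl _, by exact_mod_cast hlen0⟩
      rw [hnil] at this
      exact absurd this (List.not_mem_nil))
  rw [pvSel_full] at heq
  rw [heq]
  set candF := solutionLoopB
    (products.foldl (solutionStepB (PySem.Set.ofList purchased))
      (PySem.Dict.empty, [], PySem.Dict.empty)).2.2
    (PySem.List.sorted2
      ((products.foldl (solutionStepA purchased) ([], PySem.Dict.empty)).2.items)
      (fun x => -x.2) (fun x => x.1))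
    (PySem.List.pyRange 0 (np0.length : Int) 1) with hcandF
  cases hmin : PySem.List.min? candF (fun x => x) with
  | none => exact absurd ((PySem.List.min?_eq_none_iff _ _).mp hmin) hne
  | some m =>
    have hmC : m ∈ candF := PySem.List.min?_mem hmin
    have hminLe : ∀ y ∈ candF, m ≤ y := PySem.List.min?_isMin hmin
    obtain ⟨h0m, hltm⟩ := hbd m hmC
    obtain ⟨t, ht⟩ := pvSel_head np0 candF m hmC hminLe h0m hltm
    rw [ht, PySem.List.pyGetD_zero_cons]
    dsimp only
    have hmlt : m.toNat < np0.length := by omega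
    have hrhs : PySem.List.pyGetD (np0.map pvHd) m "" = pvHd (np0.getD m.toNat []) := by
      rw [PySem.List.pyGetD_eq_getElem _ _ h0m
        (by rw [List.length_map]; exact_mod_cast hltm)]
      rw [List.getElem_map, List.getD_eq_getElem _ _ hmlt]
    rw [hrhs]
    rfl
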